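-- pv_equiv track=rewrite | github.com/WeiFeng0726/dual-hotspot-peptide-design-md-workflow | analysis/peptide_design/secondary_screen_complexa.py | choose_chains
-- ===== SOURCE A (Python) =====
-- from collections import defaultdict
--
-- def choose_chains(residues):
--     chain_counts = defaultdict(set)
--     for chain, resseq, icode in residues:
--         chain_counts[chain].add((resseq, icode))
--     ordered = sorted(chain_counts.items(), key=lambda item: len(item[1]), reverse=True)
--     target_chain = ordered[0][0]
--     binder_chain = ordered[-1][0]
--     return target_chain, binder_chain, {chain: len(res_ids) for chain, res_ids in chain_counts.items()}
-- ===== SOURCE B (Python) =====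
-- def choose_chains(residues):
--     # Simpler: one linear scan over the counts instead of sorting;
--     # strict ">" keeps the first max (like the stable reverse sort's head),
--     # "<=" keeps the last min (like its tail).
--     chain_counts = {}
--     for chain, resseq, icode in residues:
--         s = chain_counts.get(chain, set())
--         s.add((resseq, icode))
--         chain_counts[chain] = s
--     counts = {c: len(s) for c, s in chain_counts.items()}
--     items = list(counts.items())
--     best_t = items[0]
--     best_b = items[0]
--     for item in items[1:]:
--         if item[1] > best_t[1]:
--             best_t = item
--         if item[1] <= best_b[1]:
--             best_b = item
--     return best_t[0], best_b[0], counts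
-- ===== Notes on version B (the rewrite author's own statement) =====
-- stated objective: simpler
-- what changed: Replaces the stable reverse sort of chain_counts.items() with a single linear scan that keeps the first chain of strictly-maximal count (target) and the last chain of minimal count (binder), matching the stable sort's tie-breaking exactly.
import Mathlib
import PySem

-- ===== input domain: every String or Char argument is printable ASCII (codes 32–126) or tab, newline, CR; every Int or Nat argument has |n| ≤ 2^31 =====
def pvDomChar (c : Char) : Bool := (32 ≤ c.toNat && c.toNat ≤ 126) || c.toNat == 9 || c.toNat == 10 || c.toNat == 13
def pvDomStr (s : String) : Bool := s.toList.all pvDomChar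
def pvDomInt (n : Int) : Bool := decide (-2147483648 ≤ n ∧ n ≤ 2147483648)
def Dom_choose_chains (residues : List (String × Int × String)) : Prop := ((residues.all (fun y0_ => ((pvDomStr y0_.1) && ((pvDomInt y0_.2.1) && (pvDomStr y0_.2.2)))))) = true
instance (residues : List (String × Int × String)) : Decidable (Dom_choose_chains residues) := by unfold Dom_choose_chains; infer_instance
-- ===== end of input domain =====

-- ===== PORT A =====
-- B replaces A's stable reverse sort with one linear scan over the counts; objective: simpler.
def choose_chains (residues : List (String × Int × String)) : String × String × (List (String × Int)) :=
  let chain_counts : PySem.Dict String (PySem.Set (Int × String)) :=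
    residues.foldl
      (fun d r => d.modify r.1 PySem.Set.empty (fun s => PySem.Set.add s (r.2.1, r.2.2)))
      PySem.Dict.empty
  let ordered :=
    PySem.List.sorted chain_counts.items (fun it => (it.2.length : Int)) true
  -- Python indexes ordered[0] / ordered[-1]; raises IndexError on empty input (excluded by Pre_)
  let target_chain := (PySem.List.pyGetD ordered 0 ("", PySem.Set.empty)).1
  let binder_chain := (PySem.List.pyGetD ordered (-1) ("", PySem.Set.empty)).1
  (target_chain, binder_chain,
    chain_counts.items.map (fun p => (p.1, (p.2.length : Int))))

-- ===== PORT B =====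
def choose_chains_alt (residues : List (String × Int × String)) : String × String × (List (String × Int)) :=
  let chain_counts : PySem.Dict String (PySem.Set (Int × String)) :=
    residues.foldl
      (fun d r => d.insert r.1 (PySem.Set.add (d.getD r.1 PySem.Set.empty) (r.2.1, r.2.2)))
      PySem.Dict.empty
  let counts := chain_counts.items.map (fun p => (p.1, (p.2.length : Int)))
  match counts with
  | [] => ("", "", [])   -- Python items[0] raises IndexError here (excluded by Pre_)
  | c0 :: rest =>
    let st := rest.foldl
      (fun (st : (String × Int) × (String × Int)) item =>
        ((if item.2 > st.1.2 then item else st.1),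
         (if item.2 ≤ st.2.2 then item else st.2)))
      (c0, c0)
    (st.1.1, st.2.1, counts)

-- ===== PRECONDITION & SPEC =====
-- Pre_ excludes only the empty list, on which Python A raises IndexError (ordered[0]).
def Pre_choose_chains (residues : List (String × Int × String)) : Prop := residues ≠ []
instance (residues : List (String × Int × String)) : Decidable (Pre_choose_chains residues) := by
  unfold Pre_choose_chains; infer_instance
def pvWitness_choose_chains : (List (String × Int × String)) := [("A", 1, "")]
def Spec_choose_chains (residues : List (String × Int × String)) (out : String × String × (List (String × Int))) : Prop := out = choose_chains_alt residues
instance (residues : List (String × Int × String)) (out : String × String × (List (String × Int))) : Decidable (Spec_choose_chains residues out) := by unfold Spec_choose_chains; infer_instance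

-- ===== CLAIM (what is proved, stated in full; the proofs are below) =====
def Claim_equal_choose_chains : Prop := ∀ (residues : List (String × Int × String)), Dom_choose_chains residues → Pre_choose_chains residues → Spec_choose_chains residues (choose_chains residues)

-- ===== LEMMAS AND PROOFS =====

-- the scan of B, abstractly: fold keeping (first strict max, last min) elements
def pvScan {α : Type} (key : α → Int) (r : List α) (st : α × α) : α × α :=
  r.foldl (fun st x => ((if key x > key st.1 then x else st.1),
                        (if key x ≤ key st.2 then x else st.2))) st

theorem pv_insertBy_ne_nil {α : Type} (bef : α → α → Bool) (x : α) (acc : List α) :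
    PySem.List.insertBy bef x acc ≠ [] := by
  cases acc with
  | nil => simp [PySem.List.insertBy]
  | cons y ys => simp only [PySem.List.insertBy]; split <;> simp

theorem pv_getLast?_insertBy {α : Type} (bef : α → α → Bool) (x : α) (acc : List α) :
    (PySem.List.insertBy bef x acc).getLast? =
      if acc.any (bef x) then acc.getLast? else some x := by
  induction acc with
  | nil => simp [PySem.List.insertBy]
  | cons y ys ih =>
    simp only [PySem.List.insertBy, List.any_cons]
    by_cases h : bef x y = true
    · simp [h, List.getLast?_cons_cons]
    · have hne := pv_insertBy_ne_nil bef x ys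
      rcases hhd : PySem.List.insertBy bef x ys with _ | ⟨z, zs⟩
      · exact absurd hhd hne
      · rw [hhd] at ih
        simp only [eq_false_of_ne_true h, Bool.false_or, if_neg (by simp : ¬ (false = true))]
        rw [List.getLast?_cons_cons]
        rcases ys with _ | ⟨w, ws⟩
        · simpa using ih
        · rw [List.getLast?_cons_cons]
          exact ih

theorem pv_head?_insertBy {α : Type} (key : α → Int) (x th : α) (ys : List α) :
    (PySem.List.insertBy (fun p q => decide (key q < key p)) x (th :: ys)).head? =
      some (if key x > key th then x else th) := by
  simp only [PySem.List.insertBy]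
  by_cases h : key th < key x
  · simp [h, gt_iff_lt]
  · simp [h, gt_iff_lt]

-- MAIN: head / last of the insertion-sorted (descending, stable) list = the scan
theorem pv_main {α : Type} (key : α → Int) :
    ∀ (r acc : List α) (th bh : α),
      acc.head? = some th → acc.getLast? = some bh →
      (∀ y ∈ acc, key y ≤ key th) → (∀ y ∈ acc, key bh ≤ key y) →
      (r.foldl (fun a x => PySem.List.insertBy (fun p q => decide (key q < key p)) x a) acc).head?
          = some ((pvScan key r (th, bh)).1)
      ∧ (r.foldl (fun a x => PySem.List.insertBy (fun p q => decide (key q < key p)) x a) acc).getLast?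
          = some ((pvScan key r (th, bh)).2) := by
  intro r
  induction r with
  | nil => intro acc th bh h1 h2 _ _; simpa [pvScan] using ⟨h1, h2⟩
  | cons x r ih =>
    intro acc th bh h1 h2 hub hlb
    rcases acc with _ | ⟨a0, atl⟩
    · simp at h1
    have ha0 : th = a0 := by simpa using h1.symm
    subst ha0
    set acc' := PySem.List.insertBy (fun p q => decide (key q < key p)) x (th :: atl) with hacc'
    have hbhmem : bh ∈ th :: atl := List.mem_of_getLast? h2
    have hhd' : acc'.head? = some (if key x > key th then x else th) :=
      pv_head?_insertBy key x th atl
    have hany : (th :: atl).any (fun q => decide (key q < key x)) = decide (¬ (key x ≤ key bh)) := by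
      by_cases hc : key x ≤ key bh
      · simp only [hc, not_true_eq_false, decide_false]
        rw [List.any_eq_false]
        intro y hy
        have := hlb y hy
        simp only [decide_eq_true_eq]
        omega
      · simp only [hc, not_false_eq_true, decide_true]
        rw [List.any_eq_true]
        exact ⟨bh, hbhmem, by simp only [decide_eq_true_eq]; omega⟩
    have hlast' : acc'.getLast? = some (if key x ≤ key bh then x else bh) := by
      rw [hacc', pv_getLast?_insertBy, hany]
      by_cases hc : key x ≤ key bh
      · simp [hc]
      · simp [hc, h2]
    have hub' : ∀ y ∈ acc', key y ≤ key (if key x > key th then x else th) := by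
      intro y hy
      rcases (PySem.List.mem_insertBy _ _ _ _).1 hy with hyx | hym
      · subst hyx; split <;> omega
      · have := hub y hym; split <;> omega
    have hlb' : ∀ y ∈ acc', key (if key x ≤ key bh then x else bh) ≤ key y := by
      intro y hy
      rcases (PySem.List.mem_insertBy _ _ _ _).1 hy with hyx | hym
      · subst hyx; split <;> omega
      · have := hlb y hym; split <;> omega
    have := ih acc' _ _ hhd' hlast' hub' hlb'
    simpa [pvScan, List.foldl_cons] using this

-- B's fold over the mapped counts is the (f-image of the) abstract scan over the items
theorem pv_scan_map {α : Type} (f : α → String × Int) :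
    ∀ (r : List α) (a b : α),
      (r.map f).foldl
        (fun (st : (String × Int) × (String × Int)) item =>
          ((if item.2 > st.1.2 then item else st.1),
           (if item.2 ≤ st.2.2 then item else st.2)))
        (f a, f b)
      = (f (pvScan (fun x => (f x).2) r (a, b)).1, f (pvScan (fun x => (f x).2) r (a, b)).2) := by
  intro r
  induction r with
  | nil => intro a b; simp [pvScan]
  | cons x r ih =>
    intro a b
    simp only [List.map_cons, List.foldl_cons, pvScan] at ih ⊢
    by_cases h1 : (f x).2 > (f a).2 <;> by_cases h2 : (f x).2 ≤ (f b).2 <;>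
      simp [h1, h2, ih]

theorem pv_pyGetD_zero {α : Type} (th : α) (tl : List α) (d : α) :
    PySem.List.pyGetD (th :: tl) 0 d = th := by
  simp [PySem.List.pyGetD, PySem.List.pyGet?, PySem.List.pyIdx?]

theorem pv_pyGetD_neg_one {α : Type} (l : List α) (hl : l ≠ []) (bh : α) (d : α)
    (h : l.getLast? = some bh) : PySem.List.pyGetD l (-1) d = bh := by
  have hlen : 0 < l.length := List.length_pos_iff.mpr hl
  simp only [PySem.List.pyGetD, PySem.List.pyGet?, PySem.List.pyIdx?]
  have h1 : ¬ (0:Int) ≤ -1 := by norm_num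
  have h2 : -(l.length : Int) ≤ -1 := by omega
  simp only [h1, if_false, h2, if_true]
  have h3 : ((-(-1:Int))).toNat = 1 := rfl
  rw [h3]
  show (l[l.length - 1]?).getD d = bh
  rw [← List.getLast?_eq_getElem?, h]
  rfl

-- ===== VERDICT (by name: the statement is the Claim_ definition above) =====
theorem choose_chains_spec : Claim_equal_choose_chains := by
  intro residues _hdom hpre
  unfold Spec_choose_chains choose_chains choose_chains_alt
  -- the two dict-building folds are definitionally equal (modify = insert of getD)
  set d : PySem.Dict String (PySem.Set (Int × String)) :=
    residues.foldl
      (fun d r => d.modify r.1 PySem.Set.empty (fun s => PySem.Set.add s (r.2.1, r.2.2)))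
      PySem.Dict.empty with hd
  have hdB : residues.foldl
      (fun d r => d.insert r.1 (PySem.Set.add (d.getD r.1 PySem.Set.empty) (r.2.1, r.2.2)))
      PySem.Dict.empty = d := rfl
  rw [hdB]
  -- the items list is nonempty
  have hkeys : d.keys = PySem.Set.update (PySem.Dict.empty : PySem.Dict String (PySem.Set (Int × String))).keys (residues.map (·.1)) := by
    rw [hd]
    exact PySem.Dict.keys_foldl_modify_key residues (·.1) PySem.Set.empty
      (fun d r s => PySem.Set.add s (r.2.1, r.2.2)) PySem.Dict.empty
  have hitems_ne : d.items ≠ [] := by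
    intro hnil
    rcases residues with _ | ⟨r0, rs⟩
    · exact hpre rfl
    · have : r0.1 ∈ d.keys := by
        rw [hkeys]
        have : r0.1 ∈ (r0 :: rs).map (·.1) := by simp
        simpa [PySem.Set.update_nil_left] using (PySem.Set.mem_ofList _ _).mpr this
      rw [PySem.Dict.keys, hnil] at this
      simp at this
  -- peel the first item
  rcases hit : d.items with _ | ⟨i0, irest⟩
  · exact absurd hit hitems_ne
  set key : String × PySem.Set (Int × String) → Int := fun it => (it.2.length : Int) with hkey
  set f : String × PySem.Set (Int × String) → String × Int := fun p => (p.1, (p.2.length : Int)) with hf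
  -- A side: sorted = foldl insertBy from [i0]
  have hsorted : PySem.List.sorted d.items key true =
      irest.foldl (fun a x => PySem.List.insertBy (fun p q => decide (key q < key p)) x a)
        [i0] := by
    rw [PySem.List.sorted_rev_eq_foldl_insertBy, hit]
    rfl
  have hmain := pv_main key irest [i0] i0 i0 (by simp) (by simp)
    (by intro y hy; simp at hy; simp [hy]) (by intro y hy; simp at hy; simp [hy])
  set sc := pvScan key irest (i0, i0) with hsc
  have hA_hd : (PySem.List.sorted d.items key true).head? = some sc.1 := by
    rw [hsorted]; exact hmain.1
  have hA_last : (PySem.List.sorted d.items key true).getLast? = some sc.2 := by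
    rw [hsorted]; exact hmain.2
  have hs_ne : PySem.List.sorted d.items key true ≠ [] := by
    rw [(PySem.List.sorted_eq_nil_iff d.items key true).ne]
    exact hitems_ne
  -- A's two indexed reads
  have hA0 : PySem.List.pyGetD (PySem.List.sorted d.items key true) 0 ("", PySem.Set.empty) = sc.1 := by
    rcases hss : PySem.List.sorted d.items key true with _ | ⟨s0, stl⟩
    · exact absurd hss hs_ne
    · rw [hss] at hA_hd
      simp only [List.head?_cons, Option.some.injEq] at hA_hd
      rw [pv_pyGetD_zero, hA_hd]
  have hAm1 : PySem.List.pyGetD (PySem.List.sorted d.items key true) (-1) ("", PySem.Set.empty) = sc.2 :=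
    pv_pyGetD_neg_one _ hs_ne _ _ hA_last
  -- B side
  have hcounts : d.items.map f = f i0 :: irest.map f := by rw [hit]; rfl
  have hB := pv_scan_map f irest i0 i0
  have hkf : (fun x => (f x).2) = key := rfl
  rw [hkf] at hB
  simp only [hcounts, hA0, hAm1]
  rw [hB]
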